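-- pv_equiv track=rewrite | github.com/youhusky/Leetcode-2018 | Quip/list_compare.py | follow2
-- ===== SOURCE A (Python) =====
-- def follow2(nums):
-- 	# T O(mn)
-- 	# S O(mn)
-- 	dic = dict()
-- 	res = []
-- 	for i in range(len(nums)):
-- 		for each in nums[i]:
-- 			if each not in dic:
-- 				dic[each] = i
-- 			else:
-- 				if dic[each] == -1:
-- 					continue
-- 				if dic[each] != i:
-- 					dic[each] = -1
-- 	#print (dic)
-- 	for key in dic:
-- 		if dic[key] != -1:
-- 			res.append(key)
-- 	return res
-- ===== SOURCE B (Python) =====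
-- def follow2(nums):
--     # Two staged passes: first count, for each element, how many of the lists
--     # contain it (dedup within each list); then rescan the input in order,
--     # emitting each element on its first overall occurrence iff its list-count
--     # is exactly 1.  No index tracking, no -1 sentinel, no dict-order output.
--     count = {}
--     for lst in nums:
--         for x in dict.fromkeys(lst):
--             count[x] = count.get(x, 0) + 1
--     res = []
--     emitted = set()
--     for lst in nums:
--         for x in lst:
--             if x not in emitted:
--                 emitted.add(x)
--                 if count[x] == 1:
--                     res.append(x)
--     return res
-- ===== Notes on version B (the rewrite author's own statement) =====
-- stated objective: alternative
-- what changed: B is a two-phase algorithm: a counting pass that tallies how many lists contain each element (per-list dedup), then a second scan of the input that emits first occurrences whose count is 1 -- replacing A's single-pass first-index/-1-sentinel state machine whose output is read off the dict's key order.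
import Mathlib
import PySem

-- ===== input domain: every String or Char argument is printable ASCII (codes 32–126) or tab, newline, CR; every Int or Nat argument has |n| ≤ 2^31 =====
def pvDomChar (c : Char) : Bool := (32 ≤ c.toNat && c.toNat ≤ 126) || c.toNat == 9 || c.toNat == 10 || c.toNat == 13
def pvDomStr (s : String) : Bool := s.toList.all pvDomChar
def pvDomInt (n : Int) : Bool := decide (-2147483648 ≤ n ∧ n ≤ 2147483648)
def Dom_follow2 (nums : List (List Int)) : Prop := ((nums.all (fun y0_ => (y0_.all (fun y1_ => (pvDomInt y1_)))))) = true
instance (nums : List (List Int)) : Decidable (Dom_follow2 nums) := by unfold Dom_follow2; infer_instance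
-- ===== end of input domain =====

-- B replaces A's single-pass first-index/-1-sentinel state machine (output read
-- off the dict's key order) by two staged passes: count the lists containing
-- each element, then rescan the input emitting first occurrences with count 1.

-- ===== PORT A =====
def follow2 (nums : List (List Int)) : List Int :=
  let dic : PySem.Dict Int Int :=
    (PySem.List.pyRange 0 (PySem.List.len nums) 1).foldl (fun dic i =>
      (PySem.List.pyGetD nums i []).foldl (fun dic each =>
        if !(dic.contains each) then dic.insert each i
        else if dic.getD each 0 == -1 then dic
        else if dic.getD each 0 != i then dic.insert each (-1)
        else dic) dic) PySem.Dict.empty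
  -- 'dic[each]' / 'dic[key]' are ported as getD with a dummy default: the key is
  -- always present at those reads, so no KeyError is reachable.
  dic.keys.foldl (fun res key => if dic.getD key 0 != -1 then res ++ [key] else res) []

-- ===== PORT B =====
-- 'dict.fromkeys(lst)' iterates the distinct elements of lst in first-occurrence
-- order = PySem.List.dedup; 'count[x]' is ported as getD with a dummy default
-- (the key is always present there, x having been counted in pass 1).
def follow2_alt (nums : List (List Int)) : List Int :=
  let count : PySem.Dict Int Int :=
    nums.foldl (fun count lst =>
      (PySem.List.dedup lst).foldl (fun c x => c.modify x 0 (fun v => v + 1)) count)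
      PySem.Dict.empty
  (nums.foldl (fun st lst =>
      lst.foldl (fun st x =>
        if !(PySem.Set.contains st.2 x) then
          (if count.getD x 0 == 1 then st.1 ++ [x] else st.1, PySem.Set.add st.2 x)
        else st) st)
    (([] : List Int), (PySem.Set.empty : PySem.Set Int))).1

-- ===== PRECONDITION & SPEC =====
def Spec_follow2 (nums : List (List Int)) (out : List Int) : Prop := out = follow2_alt nums
instance (nums : List (List Int)) (out : List Int) : Decidable (Spec_follow2 nums out) := by unfold Spec_follow2; infer_instance

-- ===== CLAIM (what is proved, stated in full; the proofs are below) =====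
def Claim_equal_follow2 : Prop := ∀ (nums : List (List Int)), Dom_follow2 nums → Spec_follow2 nums (follow2 nums)

-- ===== LEMMAS AND PROOFS =====

-- Proof-side ghost state: for each element, the set of list indices it occurs in.
def pvGhost (nums : List (List Int)) : PySem.Dict Int (PySem.Set Int) :=
  (PySem.List.enumerate nums 0).foldl (fun seen p =>
    p.2.foldl (fun d x => d.modify x PySem.Set.empty (fun s => PySem.Set.add s p.1)) seen)
    PySem.Dict.empty

-- Relation between A's value for a key and the ghost index-set for the same key.
def pvRelV (v : Int) (s : List Int) : Prop := if v = -1 then 2 ≤ s.length else s = [v]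

-- Invariant tying A's dictionary to the ghost.
def pvInv (dA : PySem.Dict Int Int) (dB : PySem.Dict Int (PySem.Set Int)) : Prop :=
  dA.keys = dB.keys ∧ dA.keys.Nodup ∧ ∀ k ∈ dA.keys, pvRelV (dA.getD k 0) (dB.getD k PySem.Set.empty)

theorem pvSet_add_len_ge {s : PySem.Set Int} (i : Int) : s.length ≤ (PySem.Set.add s i).length := by
  unfold PySem.Set.add; split <;> simp

theorem pvInv_step (i x : Int) (hi : 0 ≤ i) (dA : PySem.Dict Int Int)
    (dB : PySem.Dict Int (PySem.Set Int)) (h : pvInv dA dB) :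
    pvInv (if !(dA.contains x) then dA.insert x i
           else if dA.getD x 0 == -1 then dA
           else if dA.getD x 0 != i then dA.insert x (-1)
           else dA)
          (dB.modify x PySem.Set.empty (fun s => PySem.Set.add s i)) := by
  obtain ⟨hk, hnd, hv⟩ := h
  have hcont : dA.contains x = dB.contains x := by
    rw [PySem.Dict.contains_eq_decide_mem_keys, PySem.Dict.contains_eq_decide_mem_keys, hk]
  by_cases hc : dA.contains x = true
  · have hxA : x ∈ dA.keys := (PySem.Dict.contains_iff_mem_keys dA x).mp hc
    have hcB : dB.contains x = true := hcont ▸ hc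
    have hkB : (dB.modify x PySem.Set.empty (fun s => PySem.Set.add s i)).keys = dB.keys := by
      rw [PySem.Dict.keys_modify, PySem.Dict.keys_insert_of_contains]
      rwa [PySem.Dict.contains_eq_decide_mem_keys, ← hk, ← PySem.Dict.contains_eq_decide_mem_keys]
    have hrel := hv x hxA
    by_cases hv1 : dA.getD x 0 = -1
    · simp only [hc, hv1, Bool.not_true, beq_self_eq_true, if_true, if_false, Bool.false_eq_true]
      refine ⟨hk.trans hkB.symm, hnd, ?_⟩
      intro k hkm
      rw [PySem.Dict.getD_modify]
      by_cases he : k = x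
      · subst he
        rw [if_pos rfl]
        simp only [pvRelV, hv1, if_true]
        have h2 : 2 ≤ (dB.getD k PySem.Set.empty).length := by
          have := hv k hkm; rw [hv1] at this; simpa [pvRelV] using this
        exact le_trans h2 (pvSet_add_len_ge i)
      · rw [if_neg he]; exact hv k hkm
    · by_cases hv2 : dA.getD x 0 = i
      · have hs : dB.getD x PySem.Set.empty = [dA.getD x 0] := by
          simpa [pvRelV, hv1] using hrel
        rw [if_neg (by simp [hc]), if_neg (by simp [hv1]), if_neg (by simp [hv2])]
        refine ⟨hk.trans hkB.symm, hnd, ?_⟩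
        intro k hkm
        rw [PySem.Dict.getD_modify]
        by_cases he : k = x
        · subst he
          rw [if_pos rfl, hs, hv2]
          have : PySem.Set.add [i] i = [i] := by unfold PySem.Set.add; simp
          rw [this]
          have hne : i ≠ -1 := by omega
          simp [pvRelV, hne]
        · rw [if_neg he]; exact hv k hkm
      · have hs : dB.getD x PySem.Set.empty = [dA.getD x 0] := by
          simpa [pvRelV, hv1] using hrel
        have hkA : (dA.insert x (-1)).keys = dA.keys :=
          PySem.Dict.keys_insert_of_contains dA _ hc
        simp only [hc, Bool.not_true, if_false, Bool.false_eq_true, beq_iff_eq, hv1, bne_iff_ne,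
          ne_eq, hv2, not_false_eq_true, if_true]
        refine ⟨hkA.trans (hk.trans hkB.symm), hkA ▸ hnd, ?_⟩
        intro k hkm
        rw [hkA] at hkm
        rw [PySem.Dict.getD_modify, PySem.Dict.getD_insert]
        by_cases he : k = x
        · subst he
          rw [if_pos rfl, if_pos rfl, hs]
          have hadd : PySem.Set.add [dA.getD k 0] i = [dA.getD k 0, i] := by
            unfold PySem.Set.add
            simp [PySem.Set.contains, Ne.symm hv2]
          rw [hadd]
          simp [pvRelV]
        · rw [if_neg he, if_neg he]; exact hv k hkm
  · have hc' : dA.contains x = false := by simpa using hc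
    have hcB : dB.contains x = false := hcont ▸ hc'
    have hxA : x ∉ dA.keys := fun hm => hc ((PySem.Dict.contains_iff_mem_keys dA x).mpr hm)
    have hkA : (dA.insert x i).keys = dA.keys ++ [x] :=
      PySem.Dict.keys_insert_of_not_contains dA i hc'
    have hkB : (dB.modify x PySem.Set.empty (fun s => PySem.Set.add s i)).keys = dB.keys ++ [x] := by
      rw [PySem.Dict.keys_modify, PySem.Dict.keys_insert_of_not_contains _ _ hcB]
    rw [if_pos (by simp [hc'])]
    refine ⟨by rw [hkA, hkB, hk], ?_, ?_⟩
    · rw [hkA]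
      rw [List.nodup_append]
      exact ⟨hnd, List.nodup_singleton x, fun a ha b hb hab => hxA ((List.mem_singleton.mp hb ▸ hab) ▸ ha)⟩
    · intro k hkm
      rw [PySem.Dict.getD_modify, PySem.Dict.getD_insert]
      by_cases he : k = x
      · subst he
        rw [if_pos rfl, if_pos rfl, PySem.Dict.getD_of_not_contains dB PySem.Set.empty hcB]
        have hadd : PySem.Set.add PySem.Set.empty i = [i] := by
          unfold PySem.Set.add PySem.Set.empty; simp [PySem.Set.contains]
        rw [hadd]
        have : i ≠ -1 := by omega
        simp [pvRelV, this]
      · rw [if_neg he, if_neg he]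
        rw [hkA] at hkm
        rcases List.mem_append.mp hkm with hm | hm
        · exact hv k hm
        · exact absurd (by simpa using hm) he

theorem pvInv_inner (i : Int) (hi : 0 ≤ i) (xs : List Int) (dA : PySem.Dict Int Int)
    (dB : PySem.Dict Int (PySem.Set Int)) (h : pvInv dA dB) :
    pvInv (xs.foldl (fun dic each =>
        if !(dic.contains each) then dic.insert each i
        else if dic.getD each 0 == -1 then dic
        else if dic.getD each 0 != i then dic.insert each (-1)
        else dic) dA)
      (xs.foldl (fun d x => d.modify x PySem.Set.empty (fun s => PySem.Set.add s i)) dB) := by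
  induction xs generalizing dA dB with
  | nil => exact h
  | cons y ys ih => exact ih _ _ (pvInv_step i y hi dA dB h)

theorem pvInv_outer (l : List (Int × List Int)) (hl : ∀ p ∈ l, 0 ≤ p.1)
    (dA : PySem.Dict Int Int) (dB : PySem.Dict Int (PySem.Set Int)) (h : pvInv dA dB) :
    pvInv (l.foldl (fun dic p => p.2.foldl (fun dic each =>
        if !(dic.contains each) then dic.insert each p.1
        else if dic.getD each 0 == -1 then dic
        else if dic.getD each 0 != p.1 then dic.insert each (-1)
        else dic) dic) dA)
      (l.foldl (fun seen p =>
        p.2.foldl (fun d x => d.modify x PySem.Set.empty (fun s => PySem.Set.add s p.1)) seen) dB) := by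
  induction l generalizing dA dB with
  | nil => exact h
  | cons q qs ih =>
    exact ih (fun p hp => hl p (List.mem_cons_of_mem _ hp)) _ _
      (pvInv_inner q.1 (hl q (List.mem_cons_self)) q.2 dA dB h)

-- A's output pass, under the invariant, is a filter of the ghost keys by "index-set has size 1".
theorem pvFinal (dA : PySem.Dict Int Int) (dB : PySem.Dict Int (PySem.Set Int))
    (h : pvInv dA dB) :
    dA.keys.foldl (fun res key => if dA.getD key 0 != -1 then res ++ [key] else res) []
      = dB.keys.filter (fun k => PySem.Set.len (dB.getD k PySem.Set.empty) == 1) := by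
  obtain ⟨hk, hnd, hv⟩ := h
  rw [PySem.List.foldl_append_if_eq_filter, List.nil_append, hk]
  refine List.filter_congr ?_
  intro k hkm
  rw [← hk] at hkm
  have hrel := hv k hkm
  by_cases hv1 : dA.getD k 0 = -1
  · have h2 : 2 ≤ (dB.getD k PySem.Set.empty).length := by
      rw [hv1] at hrel; simpa [pvRelV] using hrel
    simp only [PySem.Set.empty] at h2
    have hne : ¬ ((dB.getD k []).length : Int) = 1 := by omega
    simp [hv1, PySem.Set.len, PySem.Set.empty, hne]
  · have hs : dB.getD k PySem.Set.empty = [dA.getD k 0] := by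
      simpa [pvRelV, hv1] using hrel
    simp only [PySem.Set.empty] at hs
    simp [hs, hv1, PySem.Set.len, PySem.Set.empty]

-- ghost inner pass: effect on one key's index-set.
theorem pvGhost_inner_getD (i : Int) (xs : List Int) (d : PySem.Dict Int (PySem.Set Int)) (k : Int) :
    (xs.foldl (fun d x => d.modify x PySem.Set.empty (fun s => PySem.Set.add s i)) d).getD k PySem.Set.empty
      = if k ∈ xs then PySem.Set.add (d.getD k PySem.Set.empty) i else d.getD k PySem.Set.empty := by
  induction xs generalizing d with
  | nil => simp
  | cons y ys ih =>
    simp only [List.foldl_cons, ih, PySem.Dict.getD_modify, List.mem_cons]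
    by_cases he : k = y
    · subst he
      simp only [true_or, if_true]
      by_cases hm : k ∈ ys
      · rw [if_pos hm, PySem.Set.add_of_mem (by simp [PySem.Set.mem_add])]
      · rw [if_neg hm]
    · rw [if_neg he]
      by_cases hm : k ∈ ys
      · simp [hm, he]
      · simp [hm, he]

-- ghost outer pass: the index-set of k has size = number of lists containing k,
-- and all its indices stay below the running index.
theorem pvGhost_outer_len (nums : List (List Int)) (i0 : Int)
    (d : PySem.Dict Int (PySem.Set Int)) (k : Int)
    (hb : ∀ j ∈ d.getD k PySem.Set.empty, j < i0) :
    (((PySem.List.enumerate nums i0).foldl (fun seen p =>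
        p.2.foldl (fun d x => d.modify x PySem.Set.empty (fun s => PySem.Set.add s p.1)) seen) d).getD
        k PySem.Set.empty).length
      = (d.getD k PySem.Set.empty).length + nums.countP (fun l => decide (k ∈ l)) := by
  induction nums generalizing i0 d with
  | nil => simp [PySem.List.enumerate_nil]
  | cons l ls ih =>
    rw [PySem.List.enumerate_cons, List.foldl_cons]
    have hstep := pvGhost_inner_getD i0 l d k
    by_cases hm : k ∈ l
    · have hni : i0 ∉ d.getD k PySem.Set.empty := fun h => absurd (hb _ h) (by omega)
      have hlen : ((l.foldl (fun d x => d.modify x PySem.Set.empty (fun s => PySem.Set.add s i0)) d).getD k PySem.Set.empty)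
          = d.getD k PySem.Set.empty ++ [i0] := by
        rw [hstep, if_pos hm, PySem.Set.add_of_not_mem hni]
      rw [ih (i0 + 1) _ (by
        rw [hlen]; intro j hj
        rcases List.mem_append.mp hj with h | h
        · have := hb _ h; omega
        · simp at h; omega)]
      rw [hlen]
      simp [hm]
      omega
    · have hlen : ((l.foldl (fun d x => d.modify x PySem.Set.empty (fun s => PySem.Set.add s i0)) d).getD k PySem.Set.empty)
          = d.getD k PySem.Set.empty := by rw [hstep, if_neg hm]
      rw [ih (i0 + 1) _ (by rw [hlen]; intro j hj; have := hb _ hj; omega)]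
      rw [hlen]
      simp [hm]

theorem pvGhost_len (nums : List (List Int)) (k : Int) :
    ((pvGhost nums).getD k PySem.Set.empty).length = nums.countP (fun l => decide (k ∈ l)) := by
  have := pvGhost_outer_len nums 0 PySem.Dict.empty k (by simp)
  simpa [pvGhost] using this

-- ghost keys = the distinct flattened elements in first-occurrence order.
theorem pvGhost_keys_aux (ps : List (Int × List Int)) (d : PySem.Dict Int (PySem.Set Int)) :
    (ps.foldl (fun seen p =>
        p.2.foldl (fun d x => d.modify x PySem.Set.empty (fun s => PySem.Set.add s p.1)) seen) d).keys
      = ps.foldl (fun ks p => PySem.Set.update ks p.2) d.keys := by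
  induction ps generalizing d with
  | nil => rfl
  | cons q qs ih =>
    rw [List.foldl_cons, List.foldl_cons, ih, PySem.Dict.keys_foldl_modify]

theorem pvGhost_keys (nums : List (List Int)) :
    (pvGhost nums).keys = PySem.Set.ofList nums.flatten := by
  unfold pvGhost
  rw [pvGhost_keys_aux]
  have hmap : ∀ (ps : List (Int × List Int)) (s : List Int),
      ps.foldl (fun ks p => PySem.Set.update ks p.2) s
        = (ps.map Prod.snd).foldl PySem.Set.update s := by
    intro ps
    induction ps with
    | nil => intro s; rfl
    | cons q t ih => intro s; simp only [List.foldl_cons, List.map_cons, ih]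
  have h1 : (PySem.List.enumerate nums 0).foldl (fun ks p => PySem.Set.update ks p.2)
      (PySem.Dict.empty : PySem.Dict Int (PySem.Set Int)).keys
      = nums.foldl (fun ks l => PySem.Set.update ks l) [] := by
    rw [hmap, PySem.List.map_snd_enumerate]
    rfl
  rw [h1]
  have h2 : ∀ (ls : List (List Int)) (s : PySem.Set Int),
      ls.foldl (fun ks l => PySem.Set.update ks l) s = ls.flatten.foldl PySem.Set.add s := by
    intro ls
    induction ls with
    | nil => intro s; rfl
    | cons l t ih => intro s; rw [List.foldl_cons, ih, List.flatten_cons, List.foldl_append]; rfl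
  rw [h2, PySem.Set.ofList_eq_foldl]

-- B's emission pass over a flat stream, with any predicate.
def pvNewDistinct (s : PySem.Set Int) : List Int → List Int
  | [] => []
  | x :: t => if PySem.Set.contains s x then pvNewDistinct s t
              else x :: pvNewDistinct (PySem.Set.add s x) t

theorem pvNewDistinct_foldl (xs : List Int) (s : PySem.Set Int) :
    xs.foldl PySem.Set.add s = s ++ pvNewDistinct s xs := by
  induction xs generalizing s with
  | nil => simp [pvNewDistinct]
  | cons x t ih =>
    rw [List.foldl_cons, ih, pvNewDistinct]
    by_cases hm : x ∈ s
    · rw [if_pos (by simpa using hm), PySem.Set.add_of_mem hm]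
    · rw [if_neg (by simpa using hm), PySem.Set.add_of_not_mem hm]
      simp

theorem pvEmit (p : Int → Bool) (xs : List Int) (s : PySem.Set Int) (r : List Int) :
    xs.foldl (fun st x =>
        if !(PySem.Set.contains st.2 x) then
          (if p x then st.1 ++ [x] else st.1, PySem.Set.add st.2 x)
        else st) (r, s)
      = (r ++ (pvNewDistinct s xs).filter p, xs.foldl PySem.Set.add s) := by
  induction xs generalizing s r with
  | nil => simp [pvNewDistinct]
  | cons x t ih =>
    rw [List.foldl_cons, List.foldl_cons, pvNewDistinct]
    by_cases hm : x ∈ s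
    · have hc : PySem.Set.contains s x = true := by simpa using hm
      rw [PySem.Set.add_of_mem hm]
      simp only [hc, Bool.not_true, Bool.false_eq_true, if_false, if_true]
      exact ih s r
    · have hc : PySem.Set.contains s x = false := by simpa using hm
      simp only [hc, Bool.not_false, if_true, Bool.false_eq_true, if_false]
      rw [ih]
      by_cases hp : p x = true
      · simp [hp, List.append_assoc]
      · have hp' : p x = false := by simpa using hp
        simp [hp']

-- B's counting pass: the count of k is the number of lists containing k.
theorem pvCount (nums : List (List Int)) (d : PySem.Dict Int Int) (k : Int) :
    (nums.foldl (fun count lst =>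
        (PySem.List.dedup lst).foldl (fun c x => c.modify x 0 (fun v => v + 1)) count) d).getD k 0
      = d.getD k 0 + (nums.countP (fun l => decide (k ∈ l)) : Int) := by
  induction nums generalizing d with
  | nil => simp
  | cons l ls ih =>
    rw [List.foldl_cons, ih, PySem.Dict.getD_foldl_modify_add_one]
    have hcnt : ((PySem.List.dedup l).count k : Int) = if k ∈ l then 1 else 0 := by
      by_cases hm : k ∈ l
      · rw [if_pos hm]
        have := List.count_eq_one_of_mem (PySem.List.nodup_dedup l) ((PySem.List.mem_dedup l k).mpr hm)
        omega
      · rw [if_neg hm]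
        have : (PySem.List.dedup l).count k = 0 :=
          List.count_eq_zero.mpr (fun h => hm ((PySem.List.mem_dedup l k).mp h))
        omega
    rw [hcnt, List.countP_cons]
    by_cases hm : k ∈ l <;> simp [hm] <;> omega

theorem pvNewDistinct_ofList (xs : List Int) :
    pvNewDistinct PySem.Set.empty xs = PySem.Set.ofList xs := by
  have h := pvNewDistinct_foldl xs PySem.Set.empty
  rw [PySem.Set.ofList_eq_foldl]
  simp only [PySem.Set.empty, List.nil_append] at h ⊢
  exact h.symm

-- Proof-side name for B's counting dictionary (definitionally B's first pass).
def pvCountD (nums : List (List Int)) : PySem.Dict Int Int :=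
  nums.foldl (fun count lst =>
    (PySem.List.dedup lst).foldl (fun c x => c.modify x 0 (fun v => v + 1)) count)
    PySem.Dict.empty

-- B's second pass, for an arbitrary emission predicate.
theorem pvPhase2 (p : Int → Bool) (nums : List (List Int)) :
    (nums.foldl (fun st lst =>
        lst.foldl (fun st x =>
          if !(PySem.Set.contains st.2 x) then
            (if p x then st.1 ++ [x] else st.1, PySem.Set.add st.2 x)
          else st) st)
      (([] : List Int), (PySem.Set.empty : PySem.Set Int))).1
      = (PySem.Set.ofList nums.flatten).filter p := by
  rw [← List.foldl_flatten, pvEmit, pvNewDistinct_ofList]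
  simp

-- ===== VERDICT (by name: the statement is the Claim_ definition above) =====
theorem follow2_spec : Claim_equal_follow2 := by
  intro nums _
  unfold Spec_follow2
  -- A's side: relate to the ghost.
  have hA : follow2 nums
      = (pvGhost nums).keys.filter
          (fun k => PySem.Set.len ((pvGhost nums).getD k PySem.Set.empty) == 1) := by
    unfold follow2
    have hg : pvGhost nums
        = (PySem.List.pyRange 0 (PySem.List.len nums) 1).foldl (fun seen i =>
            (PySem.List.pyGetD nums i []).foldl
              (fun d x => d.modify x PySem.Set.empty (fun s => PySem.Set.add s i)) seen)
            PySem.Dict.empty := by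
      unfold pvGhost
      rw [PySem.List.enumerate_eq_map_pyRange nums ([] : List Int), List.foldl_map]
    have hl : ∀ p ∈ (PySem.List.pyRange 0 (PySem.List.len nums) 1).map
        (fun j => (j, PySem.List.pyGetD nums j [])), 0 ≤ p.1 := by
      intro p hp
      obtain ⟨j, hj, rfl⟩ := List.mem_map.mp hp
      exact (PySem.List.mem_pyRange_one.mp hj).1
    have hinv := pvInv_outer _ hl PySem.Dict.empty PySem.Dict.empty
      ⟨by simp, by simp, by intro k hkm; simp at hkm⟩
    rw [List.foldl_map, List.foldl_map] at hinv
    simp only [] at hinv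
    have := pvFinal _ _ hinv
    rw [hg]
    exact this
  -- B's side: the two phases in closed form (defeq: pvCountD is B's first pass).
  have hB : follow2_alt nums
      = (PySem.Set.ofList nums.flatten).filter
          (fun k => (pvCountD nums).getD k 0 == 1) :=
    pvPhase2 (fun x => (pvCountD nums).getD x 0 == 1) nums
  rw [hA, hB, pvGhost_keys]
  refine List.filter_congr ?_
  intro k _
  have hc : (pvCountD nums).getD k 0 = (nums.countP (fun l => decide (k ∈ l)) : Int) := by
    unfold pvCountD
    rw [pvCount]
    simp
  simp only [PySem.Set.len]
  rw [pvGhost_len, hc]
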